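-- pv_equiv track=rewrite | github.com/ISSEI51/scraping | dairitenbosyuu/scrape.py | unify_columns
-- ===== SOURCE A (Python) =====
-- from typing import Dict, List, Optional, Tuple
--
-- REQUIRED_COLUMNS = ["取得日時", "取得URL", "名称", "住所"]
--
-- def unify_columns(records: List[Dict[str, str]]) -> List[str]:
--     """
--     出力CSVの列順を決める。
--     必須カラムは先頭に固定、任意カラムは出現したものを続ける。
--     """
--     cols = list(REQUIRED_COLUMNS)
--     seen = set(cols)
--     for rec in records:
--         if not rec:
--             continue
--         for k in rec.keys():
--             if k not in seen:
--                 seen.add(k)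
--                 cols.append(k)
--     return cols
-- ===== SOURCE B (Python) =====
-- from typing import Dict, List, Optional, Tuple
--
-- REQUIRED_COLUMNS = ["取得日時", "取得URL", "名称", "住所"]
--
-- def unify_columns(records: List[Dict[str, str]]) -> List[str]:
--     """列順: 各キーの初出位置を逆走査で記録し、その位置でソートして決める。"""
--     stream = list(REQUIRED_COLUMNS)
--     for rec in records:
--         stream.extend(rec)
--     first = {}
--     for i, k in reversed(list(enumerate(stream))):
--         first[k] = i
--     return sorted(first, key=first.get)
-- ===== Notes on version B (the rewrite author's own statement) =====
-- stated objective: alternative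
-- what changed: Instead of A's single pass that tests membership in a seen-set and appends, B computes each key's first-occurrence index with one overwrite loop over the reversed enumerated key stream (no membership test at all) and then sorts the keys by that index.
import Mathlib
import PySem

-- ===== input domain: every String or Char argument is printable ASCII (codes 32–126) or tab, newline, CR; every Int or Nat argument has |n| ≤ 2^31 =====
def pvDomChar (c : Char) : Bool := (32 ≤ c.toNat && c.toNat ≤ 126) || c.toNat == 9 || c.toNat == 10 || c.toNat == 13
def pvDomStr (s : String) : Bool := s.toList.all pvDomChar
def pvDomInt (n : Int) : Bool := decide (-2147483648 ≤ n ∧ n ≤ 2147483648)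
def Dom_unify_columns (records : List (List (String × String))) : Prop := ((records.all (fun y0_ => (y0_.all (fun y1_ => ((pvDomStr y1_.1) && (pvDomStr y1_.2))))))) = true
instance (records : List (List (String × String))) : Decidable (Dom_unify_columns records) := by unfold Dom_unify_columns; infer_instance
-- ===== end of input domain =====

-- B replaces A's incremental membership-tested accumulation by a different algorithm:
-- record each key's first-occurrence index by a single overwrite loop over the REVERSED
-- key stream (no membership test), then SORT the keys by that index (objective: alternative).

-- ===== PORT A =====
def pvRequiredColumns : List String := ["取得日時", "取得URL", "名称", "住所"]

-- literal port of A: cols/seen pair threaded through nested loops; rec.keys() is the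
-- dict's distinct keys in first-occurrence order = PySem.List.dedup (rec.map Prod.fst)
def unify_columns (records : List (List (String × String))) : List String :=
  (records.foldl
    (fun st rec =>
      if rec = [] then st
      else
        (PySem.List.dedup (rec.map Prod.fst)).foldl
          (fun st k =>
            if PySem.Set.contains st.2 k then st
            else (st.1 ++ [k], PySem.Set.add st.2 k)) st)
    (pvRequiredColumns, PySem.Set.ofList pvRequiredColumns)).1

-- ===== PORT B =====
-- port of Source B: build the key stream, record first-occurrence indices by overwriting
-- while scanning reversed(list(enumerate(stream))), then sorted(first, key=first.get)
def unify_columns_alt (records : List (List (String × String))) : List String :=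
  let stream := records.foldl (fun s rec => s ++ PySem.List.dedup (rec.map Prod.fst)) pvRequiredColumns
  let first := (PySem.List.enumerate stream).reverse.foldl
      (fun (d : PySem.Dict String Int) p => d.insert p.2 p.1) PySem.Dict.empty
  PySem.List.sorted first.keys (fun k => first.getD k 0) false

-- ===== PRECONDITION & SPEC =====
def Spec_unify_columns (records : List (List (String × String))) (out : List String) : Prop := out = unify_columns_alt records
instance (records : List (List (String × String))) (out : List String) : Decidable (Spec_unify_columns records out) := by unfold Spec_unify_columns; infer_instance

-- ===== CLAIM (what is proved, stated in full; the proofs are below) =====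
def Claim_equal_unify_columns : Prop := ∀ (records : List (List (String × String))), Dom_unify_columns records → Spec_unify_columns records (unify_columns records)

-- ===== LEMMAS AND PROOFS =====

-- A's inner loop keeps the invariant seen = cols; it is Set.update on that one list.
lemma inner_fold_eq_update (keys : List String) (c : List String) :
    keys.foldl
      (fun (st : List String × PySem.Set String) k =>
        if PySem.Set.contains st.2 k then st
        else (st.1 ++ [k], PySem.Set.add st.2 k)) (c, c)
    = (PySem.Set.update c keys, PySem.Set.update c keys) := by
  induction keys generalizing c with
  | nil => simp [PySem.Set.update]
  | cons k ks ih =>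
    rw [List.foldl_cons, PySem.Set.update_cons]
    by_cases h : k ∈ c
    · rw [if_pos ((PySem.Set.contains_iff _ _).mpr h), PySem.Set.add_of_mem h]
      exact ih c
    · rw [if_neg (fun hx => h ((PySem.Set.contains_iff _ _).mp hx)), PySem.Set.add_of_not_mem h]
      exact ih (c ++ [k])

-- A's outer loop is Set.update with the concatenation of all records' key lists.
lemma outer_fold_eq_update (records : List (List (String × String))) (c : List String) :
    records.foldl
      (fun st rec =>
        if rec = [] then st
        else
          (PySem.List.dedup (rec.map Prod.fst)).foldl
            (fun (st : List String × PySem.Set String) k =>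
              if PySem.Set.contains st.2 k then st
              else (st.1 ++ [k], PySem.Set.add st.2 k)) st) (c, c)
    = (PySem.Set.update c (records.flatMap (fun rec => PySem.List.dedup (rec.map Prod.fst))),
       PySem.Set.update c (records.flatMap (fun rec => PySem.List.dedup (rec.map Prod.fst)))) := by
  induction records generalizing c with
  | nil => simp [PySem.Set.update]
  | cons rec rs ih =>
    rw [List.foldl_cons, List.flatMap_cons, PySem.Set.update_append]
    by_cases h : rec = []
    · subst h
      simp only [List.map_nil]
      have hd : PySem.List.dedup ([] : List String) = [] := rfl
      rw [hd, PySem.Set.update_nil]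
      exact ih c
    · rw [if_neg h, inner_fold_eq_update]
      exact ih _

-- Set.ofList distributes over ++ as Set.update (both are the same foldl of add).
lemma ofList_append_eq_update (c ks : List String) :
    PySem.Set.ofList (c ++ ks) = PySem.Set.update (PySem.Set.ofList c) ks := by
  simp [PySem.Set.ofList_eq_foldl, PySem.Set.update, List.foldl_append]

-- first-occurrence dedup, unfolded one step
lemma dedup_cons (x : String) (t : List String) :
    PySem.List.dedup (x :: t) = x :: (PySem.List.dedup t).filter (fun y => y ≠ x) := by
  have h1 : PySem.List.dedup (x :: t) = PySem.Set.update (PySem.Set.ofList [x]) t := by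
    rw [PySem.List.dedup_eq_ofList]
    simpa using ofList_append_eq_update [x] t
  have h2 : PySem.Set.ofList [x] = [x] := rfl
  rw [h1, PySem.Set.update_eq_append_filter, h2]
  simp [PySem.Set.contains, PySem.List.dedup_eq_ofList, eq_comm]

-- the deduped stream lists keys in strictly increasing order of first occurrence
lemma pairwise_idxOf_dedup (s : List String) :
    (PySem.List.dedup s).Pairwise (fun a b => s.idxOf a < s.idxOf b) := by
  induction s with
  | nil => simp [PySem.List.dedup_eq_ofList, PySem.Set.ofList]
  | cons x t ih =>
    rw [dedup_cons]
    constructor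
    · intro b hb
      have hbx : b ≠ x := by simpa using (List.mem_filter.mp hb).2
      rw [List.idxOf_cons_self, List.idxOf_cons_ne t (Ne.symm hbx)]
      omega
    · refine (List.Pairwise.filter _ ih).imp_of_mem ?_
      intro a b ha hb hlt
      have hax : a ≠ x := by simpa using (List.mem_filter.mp ha).2
      have hbx : b ≠ x := by simpa using (List.mem_filter.mp hb).2
      rw [List.idxOf_cons_ne t (Ne.symm hax), List.idxOf_cons_ne t (Ne.symm hbx)]
      omega

-- a lookup in the insert loop is a last-match fold over the processed pairs
lemma getD_fold_insert (m : List (Int × String)) (d : PySem.Dict String Int) (k : String) :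
    (m.foldl (fun d p => d.insert p.2 p.1) d).getD k 0
      = m.foldl (fun a p => if p.2 = k then p.1 else a) (d.getD k 0) := by
  induction m generalizing d with
  | nil => rfl
  | cons p ps ih =>
    rw [List.foldl_cons, List.foldl_cons, ih, PySem.Dict.getD_insert]
    by_cases h : p.2 = k
    · rw [if_pos h, if_pos h.symm]
    · rw [if_neg h, if_neg (fun hx => h hx.symm)]

-- the first-match foldr over an enumerated list reads off the first-occurrence index
lemma foldr_enumerate_first (s : List String) (k : String) (i0 z : Int) :
    (PySem.List.enumerate s i0).foldr (fun p a => if p.2 = k then p.1 else a) z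
      = if k ∈ s then i0 + (s.idxOf k : Int) else z := by
  induction s generalizing i0 with
  | nil => simp [PySem.List.enumerate]
  | cons x t ih =>
    rw [PySem.List.enumerate_cons, List.foldr_cons, ih]
    by_cases hx : x = k
    · subst hx
      simp [List.idxOf_cons_self]
    · have hne : k ≠ x := fun h => hx h.symm
      rw [if_neg hx, List.idxOf_cons_ne t (Ne.symm hne)]
      by_cases hm : k ∈ t
      · rw [if_pos hm, if_pos (by simp [hm])]
        push_cast
        ring
      · rw [if_neg hm, if_neg (by simp [hne, hm])]

-- the reverse overwrite loop stores each stream element's FIRST-occurrence index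
lemma getD_first_eq_idxOf (s : List String) (k : String) (hk : k ∈ s) :
    ((PySem.List.enumerate s).reverse.foldl
        (fun (d : PySem.Dict String Int) p => d.insert p.2 p.1) PySem.Dict.empty).getD k 0
      = (s.idxOf k : Int) := by
  rw [getD_fold_insert, List.foldl_reverse]
  have h0 : (PySem.Dict.empty : PySem.Dict String Int).getD k 0 = 0 := rfl
  rw [h0, foldr_enumerate_first s k 0 0, if_pos hk]
  ring

-- the dict's key set is the distinct stream elements
lemma keys_first_eq (s : List String) :
    ((PySem.List.enumerate s).reverse.foldl
        (fun (d : PySem.Dict String Int) p => d.insert p.2 p.1) PySem.Dict.empty).keys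
      = PySem.Set.ofList s.reverse := by
  rw [PySem.Dict.keys_foldl_insert_key (PySem.List.enumerate s).reverse (·.2) (fun _ p => p.1)
        PySem.Dict.empty]
  have h1 : ((PySem.List.enumerate s).reverse.map (·.2)) = s.reverse := by
    rw [List.map_reverse, PySem.List.map_snd_enumerate]
  rw [h1]
  have h2 : (PySem.Dict.empty : PySem.Dict String Int).keys = [] := rfl
  rw [h2, PySem.Set.ofList_eq_foldl, PySem.Set.update]

-- ===== VERDICT (by name: the statement is the Claim_ definition above) =====
theorem unify_columns_spec : Claim_equal_unify_columns := by
  intro records _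
  unfold Spec_unify_columns unify_columns unify_columns_alt
  have hnd : pvRequiredColumns.Nodup := by decide
  have h1 : PySem.Set.ofList pvRequiredColumns = pvRequiredColumns :=
    PySem.Set.ofList_eq_self_of_nodup _ hnd
  -- name the common key stream
  set S : List String :=
    pvRequiredColumns ++ records.flatMap (fun rec => PySem.List.dedup (rec.map Prod.fst)) with hS
  -- A's result is the ordered dedup of S
  have hA : (records.foldl
      (fun st rec =>
        if rec = [] then st
        else
          (PySem.List.dedup (rec.map Prod.fst)).foldl
            (fun (st : List String × PySem.Set String) k =>
              if PySem.Set.contains st.2 k then st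
              else (st.1 ++ [k], PySem.Set.add st.2 k)) st)
      (pvRequiredColumns, PySem.Set.ofList pvRequiredColumns)).1 = PySem.List.dedup S := by
    conv_lhs => rw [h1]
    rw [outer_fold_eq_update, hS, PySem.List.dedup_eq_ofList, ofList_append_eq_update, h1]
  rw [hA]
  -- B's stream is S
  have hstream : records.foldl (fun s rec => s ++ PySem.List.dedup (rec.map Prod.fst))
      pvRequiredColumns = S := by
    rw [PySem.List.foldl_append_eq_flatMap]
  simp only [hstream]
  -- B's sort returns the ordered dedup of S
  refine (PySem.List.sorted_eq_of_perm_of_pairwise_lt _ _ _ ?_ ?_).symm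
  · -- dedup S is a permutation of the dict's keys
    rw [keys_first_eq]
    refine (List.perm_ext_iff_of_nodup (PySem.List.nodup_dedup S)
      (PySem.Set.nodup_ofList S.reverse)).mpr ?_
    intro a
    rw [PySem.List.mem_dedup, PySem.Set.mem_ofList, List.mem_reverse]
  · -- dedup S is strictly increasing under the stored first-occurrence index
    refine (pairwise_idxOf_dedup S).imp_of_mem ?_
    intro a b ha hb hlt
    rw [getD_first_eq_idxOf S a ((PySem.List.mem_dedup S a).mp ha),
        getD_first_eq_idxOf S b ((PySem.List.mem_dedup S b).mp hb)]
    exact_mod_cast hlt
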